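-- pv_equiv track=rewrite | github.com/Kamalabot/HowCompetitive | solution_code/Cow Baseball.py | triplet_author
-- ===== SOURCE A (Python) =====
-- from typing import List
--
-- def triplet_author(cows_list :List[int]) -> List[int]:
--     total = 0
--
--     for position1 in cows_list:
--
--         for position2 in cows_list:
--
--             first_diff = position2 - position1
--
--             if first_diff > 0:
--
--                 low = position2 + first_diff
--                 high = position2 + 2 * first_diff
--
--                 for position3 in cows_list:
--
--                     if position3 >= low and position3 <= high:
--
--                         total = total + 1
--
--     return total
-- ===== SOURCE B (Python) =====
-- from typing import List
--
--
-- def triplet_author(cows_list: List[int]) -> List[int]: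
--     # Sort once; for each increasing pair (p1, p2) count the third cows by
--     # binary search in the sorted copy instead of a third linear scan.
--     s = sorted(cows_list)
--     n = len(s)
--
--     def count_le(x):
--         # number of elements of s that are <= x (verbatim bisect.bisect_right)
--         lo, hi = 0, n
--         while lo < hi:
--             mid = (lo + hi) // 2
--             if s[mid] <= x:
--                 lo = mid + 1
--             else:
--                 hi = mid
--         return lo
--
--     total = 0
--     for p1 in cows_list:
--         for p2 in cows_list:
--             d = p2 - p1
--             if d > 0:
--                 total += count_le(p2 + 2 * d) - count_le(p2 + d - 1)
--     return total
-- ===== Notes on version B (the rewrite author's own statement) =====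
-- stated objective: faster
-- what changed: The third linear scan over the list is replaced by two binary searches (bisect_right) in a once-sorted copy, turning the inner count into O(log n).
import Mathlib
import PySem

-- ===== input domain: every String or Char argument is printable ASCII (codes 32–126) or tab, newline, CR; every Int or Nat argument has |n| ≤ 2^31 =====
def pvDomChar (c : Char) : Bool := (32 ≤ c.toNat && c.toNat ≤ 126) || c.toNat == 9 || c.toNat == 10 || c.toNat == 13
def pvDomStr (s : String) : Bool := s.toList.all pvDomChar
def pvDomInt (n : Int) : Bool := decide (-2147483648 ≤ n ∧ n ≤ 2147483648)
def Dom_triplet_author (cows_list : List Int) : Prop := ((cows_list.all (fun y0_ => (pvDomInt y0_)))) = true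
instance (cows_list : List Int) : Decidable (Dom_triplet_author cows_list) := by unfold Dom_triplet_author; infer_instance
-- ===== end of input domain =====

-- B sorts the list once and replaces A's third linear scan by two binary searches
-- (bisect_right) in the sorted copy; return values are proved equal on all inputs.


-- ===== PORT A =====
def triplet_author (cows_list : List Int) : Int :=
  cows_list.foldl (fun total position1 =>
    cows_list.foldl (fun total position2 =>
      let first_diff := position2 - position1
      if first_diff > 0 then
        let low := position2 + first_diff
        let high := position2 + 2 * first_diff
        cows_list.foldl (fun total position3 =>
          if position3 ≥ low ∧ position3 ≤ high then total + 1 else total) total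
      else total) total) 0

-- ===== PORT B =====
-- Source B's count_le(x) is verbatim bisect.bisect_right(s, x) (hand-written there only
-- because Source B may not import bisect); it is ported as the prelude's own primitive.
def triplet_author_alt (cows_list : List Int) : Int :=
  let s := PySem.List.sorted cows_list (fun x => x) false
  cows_list.foldl (fun total p1 =>
    cows_list.foldl (fun total p2 =>
      let d := p2 - p1
      if d > 0 then
        total + ((PySem.List.bisectRight s (p2 + 2 * d) : Int)
                 - (PySem.List.bisectRight s (p2 + d - 1) : Int))
      else total) total) 0

-- ===== PRECONDITION & SPEC =====
def Spec_triplet_author (cows_list : List Int) (out : Int) : Prop := out = triplet_author_alt cows_list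
instance (cows_list : List Int) (out : Int) : Decidable (Spec_triplet_author cows_list out) := by unfold Spec_triplet_author; infer_instance

-- ===== CLAIM (what is proved, stated in full; the proofs are below) =====
def Claim_equal_triplet_author : Prop := ∀ (cows_list : List Int), Dom_triplet_author cows_list → Spec_triplet_author cows_list (triplet_author cows_list)

-- ===== LEMMAS AND PROOFS =====

-- On a sorted list, bisect_right x is exactly the number of elements ≤ x.
theorem bisectRight_eq_countP_le (s : List Int) (hs : s.Pairwise (· ≤ ·)) (x : Int) :
    PySem.List.bisectRight s x = s.countP (fun p => p ≤ x) := by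
  obtain ⟨hk, hle, hgt⟩ := PySem.List.bisectRight_spec s x hs
  set k := PySem.List.bisectRight s x with hkdef
  have h1 : (s.take k).countP (fun p => p ≤ x) = k := by
    have hall : ∀ a ∈ s.take k, (fun p => decide (p ≤ x)) a = true := by
      intro a ha
      obtain ⟨j, hj, rfl⟩ := List.mem_iff_getElem.mp ha
      rw [List.getElem_take]
      have hjk : j < k := by
        have := hj; simpa [List.length_take, Nat.min_eq_left hk] using this
      exact decide_eq_true (hle j (by omega) hjk)
    rw [List.countP_eq_length.mpr hall, List.length_take, Nat.min_eq_left hk]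
  have h2 : (s.drop k).countP (fun p => p ≤ x) = 0 := by
    rw [List.countP_eq_zero]
    intro a ha
    obtain ⟨j, hj, rfl⟩ := List.mem_iff_getElem.mp ha
    rw [List.getElem_drop]
    have hlen : k + j < s.length := by
      have := hj; simp [List.length_drop] at this; omega
    have := hgt (k + j) hlen (by omega)
    simp; omega
  calc k = (s.take k).countP (fun p => p ≤ x) + (s.drop k).countP (fun p => p ≤ x) := by
            rw [h1, h2]; omega
       _ = s.countP (fun p => p ≤ x) := by
            rw [← List.countP_append, List.take_append_drop]

-- Counting in [low, high] is the difference of two prefix counts (needs low ≤ high + 1).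
theorem countP_interval (l : List Int) (low high : Int) (h : low ≤ high + 1) :
    ((l.countP (fun p => p ≤ high) : Int) - (l.countP (fun p => p ≤ low - 1) : Int))
      = (l.countP (fun p => decide (p ≥ low ∧ p ≤ high)) : Int) := by
  induction l with
  | nil => simp
  | cons a t ih =>
    rw [List.countP_cons, List.countP_cons, List.countP_cons]
    simp only [decide_eq_true_eq]
    push_cast
    split_ifs <;> omega

theorem triplet_author_main : ∀ (cows_list : List Int), Spec_triplet_author cows_list (triplet_author cows_list) := by
  intro cows
  unfold Spec_triplet_author triplet_author triplet_author_alt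
  have hs : (PySem.List.sorted cows (fun x => x) false).Pairwise (· ≤ ·) := by
    simpa using PySem.List.sorted_pairwise cows (fun x => x)
  have hperm : (PySem.List.sorted cows (fun x => x) false).Perm cows :=
    PySem.List.sorted_perm cows _ false
  simp only []
  congr 1
  funext total p1
  congr 1
  funext total p2
  by_cases hd : p2 - p1 > 0
  · simp only [if_pos hd]
    rw [PySem.List.foldl_ite_add_one
      (fun position3 => position3 ≥ p2 + (p2 - p1) ∧ position3 ≤ p2 + 2 * (p2 - p1))]
    rw [bisectRight_eq_countP_le _ hs, bisectRight_eq_countP_le _ hs,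
        List.Perm.countP_eq _ hperm, List.Perm.countP_eq _ hperm]
    have hx := countP_interval cows (p2 + (p2 - p1)) (p2 + 2 * (p2 - p1)) (by omega)
    rw [show p2 + (p2 - p1) - 1 = (p2 + (p2 - p1)) - 1 from by ring, ← hx]
  · rw [if_neg hd, if_neg hd]

-- ===== VERDICT (by name: the statement is the Claim_ definition above) =====
theorem triplet_author_spec : Claim_equal_triplet_author := fun cows _ => triplet_author_main cows
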